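-- pv_equiv track=rewrite | github.com/jexShain/aish | src/aish/tui/adapters/pty_adapter.py | extract_last_executable_command
-- ===== SOURCE A (Python) =====
-- def extract_last_executable_command(command: str) -> str:
--     """Extract the last executable command from a potentially complex command string.
--
--     Handles pipes, &&, ||, and other shell constructs.
--
--     Args:
--         command: Full command string
--
--     Returns:
--         The last executable command name
--     """
--     # Remove leading/trailing whitespace
--     command = command.strip()
--
--     # Handle common shell operators
--     for operator in ["&&", "||", "|", ";"]:
--         if operator in command:
--             # Split and take the last part
--             parts = command.split(operator)
--             command = parts[-1].strip()
--
--     # Extract command name (first word)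
--     if not command:
--         return ""
--
--     # Handle sudo/su - extract the actual command
--     parts = command.split()
--     while parts and parts[0] in ("sudo", "su"):
--         parts = parts[1:]
--         # Skip -u username, -c "command", etc.
--         while parts and parts[0].startswith("-"):
--             if parts[0] in ("-c", "-u"):
--                 parts = parts[1:]  # Skip flag value
--             parts = parts[1:]
--
--     if not parts:
--         return ""
--
--     # Get command name, remove path if present
--     cmd_name = parts[0]
--     if "/" in cmd_name:
--         cmd_name = cmd_name.split("/")[-1]
--
--     return cmd_name
-- ===== SOURCE B (Python) =====
-- def extract_last_executable_command(command: str) -> str: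
--     """Extract the last executable command from a complex shell command string.
--
--     Single left-to-right scan for the segment after the last shell operator
--     (&&, ||, | or ;), then index-based sudo/su flag stripping and a
--     rfind-based basename."""
--     s = command.strip()
--     # One pass: remember where the segment after the most recent operator starts.
--     last = 0
--     i = 0
--     n = len(s)
--     while i < n:
--         if s.startswith("&&", i) or s.startswith("||", i):
--             last = i + 2
--             i += 2
--         elif s[i] == "|" or s[i] == ";":
--             last = i + 1
--             i += 1
--         else:
--             i += 1
--     tokens = s[last:].split()
--     # Skip sudo/su prefixes and their flags with an index pointer.
--     n = len(tokens)
--     i = 0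
--     while i < n and tokens[i] in ("sudo", "su"):
--         i += 1
--         while i < n and tokens[i].startswith("-"):
--             if tokens[i] in ("-c", "-u"):
--                 i += 1
--             i += 1
--     if i >= n:
--         return ""
--     name = tokens[i]
--     return name[name.rfind("/") + 1:]
-- ===== Notes on version B (the rewrite author's own statement) =====
-- stated objective: alternative
-- what changed: A's four sequential split-on-operator passes are replaced by one left-to-right scan that tracks where the segment after the most recent shell operator starts; the sudo/su flag stripping walks an index pointer instead of repeatedly slicing the token list, and the basename is taken with rfind('/') instead of split('/')[-1].
import Mathlib
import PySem

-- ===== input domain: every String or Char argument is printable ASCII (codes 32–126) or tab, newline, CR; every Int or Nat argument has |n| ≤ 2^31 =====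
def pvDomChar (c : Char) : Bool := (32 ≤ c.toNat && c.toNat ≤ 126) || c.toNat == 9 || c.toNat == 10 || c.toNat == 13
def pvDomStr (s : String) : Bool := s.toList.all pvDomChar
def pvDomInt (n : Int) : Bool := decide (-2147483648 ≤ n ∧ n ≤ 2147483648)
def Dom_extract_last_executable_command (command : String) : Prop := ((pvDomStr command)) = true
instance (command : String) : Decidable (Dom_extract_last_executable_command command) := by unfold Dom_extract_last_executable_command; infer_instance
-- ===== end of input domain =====

-- B replaces A's four sequential operator split-passes by ONE left-to-right scan for the
-- segment after the last shell operator, skips sudo/su flags with an index pointer instead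
-- of repeated list slicing, and takes the basename via rfind instead of split("/"):
-- objective: alternative (same behaviour, genuinely different traversal).

-- ===== PORT A =====
-- A: one pass of the `for operator in [...]` loop body
def pvStepA (c : List Char) (op : List Char) : List Char :=
  if PySem.Chars.isIn op c then
    PySem.Chars.strip ((PySem.List.pyGet? (PySem.Chars.splitOn c op) (-1)).getD [])
  else c

-- A: the inner `while parts and parts[0].startswith("-")` loop
def pvFlagsA : List (List Char) → List (List Char)
  | [] => []
  | p :: rest =>
    if PySem.Chars.startswith p ['-'] then
      if p = ['-', 'c'] ∨ p = ['-', 'u'] then pvFlagsA (rest.drop 1) else pvFlagsA rest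
    else p :: rest
termination_by l => l.length
decreasing_by
  · simp only [List.length_drop, List.length_cons]; omega
  · simp only [List.length_cons]; omega

theorem pvFlagsA_length_le (l : List (List Char)) : (pvFlagsA l).length ≤ l.length := by
  induction l using pvFlagsA.induct with
  | case1 => simp [pvFlagsA]
  | case2 p rest h1 h2 ih =>
      rw [pvFlagsA, if_pos h1, if_pos h2]
      simp only [List.length_drop] at ih
      simp only [List.length_cons]; omega
  | case3 p rest h1 h2 ih =>
      rw [pvFlagsA, if_pos h1, if_neg h2]
      simp only [List.length_cons]; omega
  | case4 p rest h1 =>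
      rw [pvFlagsA, if_neg h1]

-- A: the outer `while parts and parts[0] in ("sudo", "su")` loop
def pvSudoA : List (List Char) → List (List Char)
  | [] => []
  | p :: rest =>
    if p = ['s', 'u', 'd', 'o'] ∨ p = ['s', 'u'] then pvSudoA (pvFlagsA rest)
    else p :: rest
termination_by l => l.length
decreasing_by
  have := pvFlagsA_length_le rest
  simp only [List.length_cons]; omega

def extract_last_executable_command (command : String) : String :=
  let c0 := PySem.Chars.strip command.toList
  let c4 := [['&', '&'], ['|', '|'], ['|'], [';']].foldl pvStepA c0
  if c4 = [] then "" else
    let parts := pvSudoA (PySem.Chars.split₀ c4)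
    if parts = [] then "" else
      let cmd := (PySem.List.pyGet? parts 0).getD []
      let cmd := if PySem.Chars.isIn ['/'] cmd then
          (PySem.List.pyGet? (PySem.Chars.splitOn cmd ['/']) (-1)).getD []
        else cmd
      String.ofList cmd

-- ===== PORT B =====
-- B: the single scan of Source B; `d` is the current segment start s[last:], the second
-- argument is the not-yet-scanned suffix s[i:]
def pvScanB (d s : List Char) : List Char :=
  match s with
  | [] => d
  | c :: r =>
    if (c = '&' ∧ r.head? = some '&') ∨ (c = '|' ∧ r.head? = some '|') then
      pvScanB r.tail r.tail
    else if c = '|' ∨ c = ';' then pvScanB r r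
    else pvScanB d r
termination_by s.length
decreasing_by
  · simp only [List.length_cons]; cases r <;> simp
  · simp only [List.length_cons]; omega
  · simp only [List.length_cons]; omega

-- B: the inner flag-skipping loop, index pointer
def pvFlagsB (tokens : List (List Char)) (i : Nat) : Nat :=
  if h : i < tokens.length then
    if PySem.Chars.startswith tokens[i] ['-'] then
      if tokens[i] = ['-', 'c'] ∨ tokens[i] = ['-', 'u'] then pvFlagsB tokens (i + 2)
      else pvFlagsB tokens (i + 1)
    else i
  else i
termination_by tokens.length - i

theorem le_pvFlagsB (tokens : List (List Char)) (i : Nat) : i ≤ pvFlagsB tokens i := by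
  have H : ∀ n i, tokens.length - i ≤ n → i ≤ pvFlagsB tokens i := by
    intro n
    induction n with
    | zero =>
        intro i h
        rw [pvFlagsB, dif_neg (by omega)]
    | succ n ih =>
        intro i h
        rw [pvFlagsB]
        by_cases hi : i < tokens.length
        · rw [dif_pos hi]
          by_cases h1 : PySem.Chars.startswith tokens[i] ['-'] = true
          · rw [if_pos h1]
            by_cases h2 : tokens[i] = ['-', 'c'] ∨ tokens[i] = ['-', 'u']
            · rw [if_pos h2]; have := ih (i + 2) (by omega); omega
            · rw [if_neg h2]; have := ih (i + 1) (by omega); omega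
          · rw [if_neg h1]
        · rw [dif_neg hi]
  exact H _ i le_rfl

-- B: the outer sudo/su loop, index pointer
def pvSudoB (tokens : List (List Char)) (i : Nat) : Nat :=
  if h : i < tokens.length then
    if tokens[i] = ['s', 'u', 'd', 'o'] ∨ tokens[i] = ['s', 'u'] then
      pvSudoB tokens (pvFlagsB tokens (i + 1))
    else i
  else i
termination_by tokens.length - i
decreasing_by
  have := le_pvFlagsB tokens (i + 1)
  omega

def extract_last_executable_command_alt (command : String) : String :=
  let s := PySem.Chars.strip command.toList
  let tokens := PySem.Chars.split₀ (pvScanB s s)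
  let i := pvSudoB tokens 0
  if h : i < tokens.length then
    let name := tokens[i]
    String.ofList (PySem.List.slice name (some (PySem.Chars.rfind name ['/'] + 1)) none)
  else ""

-- ===== PRECONDITION & SPEC =====
def Spec_extract_last_executable_command (command : String) (out : String) : Prop := out = extract_last_executable_command_alt command
instance (command : String) (out : String) : Decidable (Spec_extract_last_executable_command command out) := by unfold Spec_extract_last_executable_command; infer_instance

-- ===== CLAIM (what is proved, stated in full; the proofs are below) =====
def Claim_equal_extract_last_executable_command : Prop := ∀ (command : String), Dom_extract_last_executable_command command → Spec_extract_last_executable_command command (extract_last_executable_command command)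

-- ===== LEMMAS AND PROOFS ===== (body below claim block)

-- suffix after the last (greedy, left-to-right) occurrence of the 2-char operator [a,b]
def pvTwo? (a b : Char) (s : List Char) : Option (List Char) :=
  match s with
  | [] => none
  | c :: r =>
    if c = a ∧ r.head? = some b then some ((pvTwo? a b r.tail).getD r.tail)
    else pvTwo? a b r
termination_by s.length
decreasing_by
  · simp only [List.length_cons]; cases r <;> simp
  · simp only [List.length_cons]; omega

-- suffix after the last occurrence of the 1-char operator [ch]
def pvOne? (ch : Char) : List Char → Option (List Char)
  | [] => none
  | c :: r => if c = ch then some ((pvOne? ch r).getD r) else pvOne? ch r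

def pvSt2 (a b : Char) (c : List Char) : List Char := (pvTwo? a b c).getD c
def pvSt1 (ch : Char) (c : List Char) : List Char := (pvOne? ch c).getD c

-- the four sequential split stages of A, composed
def pvComp (c : List Char) : List Char :=
  pvSt1 ';' (pvSt1 '|' (pvSt2 '|' '|' (pvSt2 '&' '&' c)))

-- suffix after the last operator token of the combined scan; none if no operator occurs
def pvLt (s : List Char) : Option (List Char) :=
  match s with
  | [] => none
  | c :: r =>
    if (c = '&' ∧ r.head? = some '&') ∨ (c = '|' ∧ r.head? = some '|') then
      some ((pvLt r.tail).getD r.tail)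
    else if c = '|' ∨ c = ';' then some ((pvLt r).getD r)
    else pvLt r
termination_by s.length
decreasing_by
  · simp only [List.length_cons]; cases r <;> simp
  · simp only [List.length_cons]; omega
  · simp only [List.length_cons]; omega

theorem pvScanB_eq_lt (d rem : List Char) : pvScanB d rem = (pvLt rem).getD d := by
  have H : ∀ n rem d, rem.length ≤ n → pvScanB d rem = (pvLt rem).getD d := by
    intro n
    induction n with
    | zero =>
        intro rem d h
        have : rem = [] := by cases rem <;> simp_all
        subst this; rw [pvScanB, pvLt]; rfl
    | succ n ih =>
        intro rem d h
        cases rem with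
        | nil => rw [pvScanB, pvLt]; rfl
        | cons c r =>
            rw [pvScanB, pvLt]
            by_cases h1 : (c = '&' ∧ r.head? = some '&') ∨ (c = '|' ∧ r.head? = some '|')
            · rw [if_pos h1, if_pos h1]
              have hr : r.tail.length ≤ n := by
                simp only [List.length_cons] at h
                cases r <;> simp_all <;> omega
              rw [ih r.tail r.tail hr]; rfl
            · rw [if_neg h1, if_neg h1]
              by_cases h2 : c = '|' ∨ c = ';'
              · rw [if_pos h2, if_pos h2]
                rw [ih r r (by simp only [List.length_cons] at h; omega)]; rfl
              · rw [if_neg h2, if_neg h2]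
                rw [ih r d (by simp only [List.length_cons] at h; omega)]
  exact H rem.length rem d le_rfl

theorem pvTwo?_nil (a b : Char) : pvTwo? a b [] = none := by rw [pvTwo?]

theorem pvTwo?_cons (a b c : Char) (r : List Char) :
    pvTwo? a b (c :: r) =
      if c = a ∧ r.head? = some b then some ((pvTwo? a b r.tail).getD r.tail)
      else pvTwo? a b r := by rw [pvTwo?]

theorem pvTwo?_pass (a b c : Char) (r : List Char) (h : ¬ (c = a ∧ r.head? = some b)) :
    pvTwo? a b (c :: r) = pvTwo? a b r := by rw [pvTwo?_cons, if_neg h]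

theorem pvOne?_pass (ch c : Char) (r : List Char) (h : c ≠ ch) :
    pvOne? ch (c :: r) = pvOne? ch r := by simp [pvOne?, h]

theorem pvLt_nil : pvLt [] = none := by rw [pvLt]

theorem pvLt_cons (c : Char) (r : List Char) :
    pvLt (c :: r) =
      if (c = '&' ∧ r.head? = some '&') ∨ (c = '|' ∧ r.head? = some '|') then
        some ((pvLt r.tail).getD r.tail)
      else if c = '|' ∨ c = ';' then some ((pvLt r).getD r)
      else pvLt r := by rw [pvLt]

theorem pvLt_none_iff (s : List Char) :
    pvLt s = none ↔
      pvTwo? '&' '&' s = none ∧ pvTwo? '|' '|' s = none ∧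
      pvOne? '|' s = none ∧ pvOne? ';' s = none := by
  have H : ∀ n s, s.length ≤ n →
      (pvLt s = none ↔
        pvTwo? '&' '&' s = none ∧ pvTwo? '|' '|' s = none ∧
        pvOne? '|' s = none ∧ pvOne? ';' s = none) := by
    intro n
    induction n with
    | zero =>
        intro s h
        have hs : s = [] := by cases s <;> simp_all
        subst hs; simp [pvLt_nil, pvTwo?_nil, pvOne?]
    | succ n ih =>
        intro s h
        cases s with
        | nil => simp [pvLt_nil, pvTwo?_nil, pvOne?]
        | cons c r =>
            simp only [List.length_cons] at h
            by_cases h1 : (c = '&' ∧ r.head? = some '&') ∨ (c = '|' ∧ r.head? = some '|')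
            · rw [pvLt_cons, if_pos h1]
              rcases h1 with ⟨hc, hr⟩ | ⟨hc, hr⟩
              · subst hc
                rw [pvTwo?_cons '&' '&', if_pos ⟨rfl, hr⟩]
                simp
              · subst hc
                rw [pvTwo?_cons '|' '|' '|' r, if_pos ⟨rfl, hr⟩]
                simp
            · by_cases h2 : c = '|' ∨ c = ';'
              · rw [pvLt_cons, if_neg h1, if_pos h2]
                rcases h2 with hc | hc <;> subst hc <;> simp [pvOne?]
              · have h1' := not_or.mp h1
                rw [pvLt_cons, if_neg h1, if_neg h2,
                    pvTwo?_pass _ _ _ _ h1'.1, pvTwo?_pass _ _ _ _ h1'.2,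
                    pvOne?_pass _ _ _ (fun hc => h2 (Or.inl hc)),
                    pvOne?_pass _ _ _ (fun hc => h2 (Or.inr hc))]
                exact ih r (by omega)
  exact H s.length s le_rfl

theorem pvComp_congr (x y : List Char)
    (hA : pvTwo? '&' '&' x = pvTwo? '&' '&' y)
    (hB : pvTwo? '|' '|' x = pvTwo? '|' '|' y)
    (hC : pvOne? '|' x = pvOne? '|' y)
    (hD : pvOne? ';' x = pvOne? ';' y)
    (hne : ¬ (pvTwo? '&' '&' y = none ∧ pvTwo? '|' '|' y = none ∧
              pvOne? '|' y = none ∧ pvOne? ';' y = none)) :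
    pvComp x = pvComp y := by
  unfold pvComp pvSt2 pvSt1
  cases cA : pvTwo? '&' '&' y with
  | some u => rw [hA, cA]; simp only [Option.getD_some]
  | none =>
    rw [hA, cA]; simp only [Option.getD_none]
    cases cB : pvTwo? '|' '|' y with
    | some u => rw [hB, cB]; simp only [Option.getD_some]
    | none =>
      rw [hB, cB]; simp only [Option.getD_none]
      cases cC : pvOne? '|' y with
      | some u => rw [hC, cC]; simp only [Option.getD_some]
      | none =>
        rw [hC, cC]; simp only [Option.getD_none]
        cases cD : pvOne? ';' y with
        | some u => rw [hD, cD]; rfl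
        | none => exact absurd ⟨cA, cB, cC, cD⟩ hne

theorem pvLt_comp (c : List Char) : (pvLt c).getD c = pvComp c := by
  have H : ∀ n s, s.length ≤ n → (pvLt s).getD s = pvComp s := by
    intro n
    induction n with
    | zero =>
        intro s h
        have hs : s = [] := by cases s <;> simp_all
        subst hs
        simp [pvLt_nil, pvComp, pvSt1, pvSt2, pvTwo?_nil, pvOne?]
    | succ n ih =>
        intro s h
        cases s with
        | nil => simp [pvLt_nil, pvComp, pvSt1, pvSt2, pvTwo?_nil, pvOne?]
        | cons c r =>
          simp only [List.length_cons] at h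
          by_cases h1 : (c = '&' ∧ r.head? = some '&') ∨ (c = '|' ∧ r.head? = some '|')
          · rcases h1 with ⟨hc, hr⟩ | ⟨hc, hr⟩
            · subst hc
              cases r with
              | nil => simp at hr
              | cons y t =>
                simp only [List.head?_cons, Option.some.injEq] at hr
                subst hr
                rw [pvLt_cons, if_pos (Or.inl ⟨rfl, rfl⟩)]
                simp only [List.tail_cons, Option.getD_some]
                rw [ih t (by simp only [List.length_cons] at h; omega)]
                have hAmp : pvSt2 '&' '&' ('&' :: '&' :: t) = pvSt2 '&' '&' t := by
                  unfold pvSt2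
                  rw [pvTwo?_cons, if_pos ⟨rfl, rfl⟩]
                  simp only [List.tail_cons, Option.getD_some]
                unfold pvComp
                rw [hAmp]
            · subst hc
              cases r with
              | nil => simp at hr
              | cons y t =>
                simp only [List.head?_cons, Option.some.injEq] at hr
                subst hr
                rw [pvLt_cons, if_pos (Or.inr ⟨rfl, rfl⟩)]
                simp only [List.tail_cons, Option.getD_some]
                rw [ih t (by simp only [List.length_cons] at h; omega)]
                have hA : pvTwo? '&' '&' ('|' :: '|' :: t) = pvTwo? '&' '&' t := by
                  rw [pvTwo?_pass _ _ _ _ (by simp), pvTwo?_pass _ _ _ _ (by simp)]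
                cases cA : pvTwo? '&' '&' t with
                | some u =>
                    unfold pvComp
                    rw [show pvSt2 '&' '&' ('|' :: '|' :: t) = pvSt2 '&' '&' t from by
                      unfold pvSt2; rw [hA, cA]; rfl]
                | none =>
                    unfold pvComp
                    rw [show pvSt2 '&' '&' ('|' :: '|' :: t) = '|' :: '|' :: t from by
                        unfold pvSt2; rw [hA, cA]; rfl,
                      show pvSt2 '&' '&' t = t from by unfold pvSt2; rw [cA]; rfl]
                    rw [show pvSt2 '|' '|' ('|' :: '|' :: t) = pvSt2 '|' '|' t from by
                      unfold pvSt2; rw [pvTwo?_cons, if_pos ⟨rfl, rfl⟩]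
                      simp only [List.tail_cons, Option.getD_some]]
          · have h1' := not_or.mp h1
            by_cases h2 : c = '|' ∨ c = ';'
            · rw [pvLt_cons, if_neg h1, if_pos h2]
              simp only [Option.getD_some]
              rw [ih r (by omega)]
              have hA : pvTwo? '&' '&' (c :: r) = pvTwo? '&' '&' r := pvTwo?_pass _ _ _ _ h1'.1
              have hB : pvTwo? '|' '|' (c :: r) = pvTwo? '|' '|' r := pvTwo?_pass _ _ _ _ h1'.2
              rcases h2 with hc | hc
              · subst hc
                cases cA : pvTwo? '&' '&' r with
                | some u =>
                    unfold pvComp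
                    rw [show pvSt2 '&' '&' ('|' :: r) = pvSt2 '&' '&' r from by
                      unfold pvSt2; rw [hA, cA]; rfl]
                | none =>
                    unfold pvComp
                    rw [show pvSt2 '&' '&' ('|' :: r) = '|' :: r from by unfold pvSt2; rw [hA, cA]; rfl,
                      show pvSt2 '&' '&' r = r from by unfold pvSt2; rw [cA]; rfl]
                    cases cB : pvTwo? '|' '|' r with
                    | some u =>
                        rw [show pvSt2 '|' '|' ('|' :: r) = pvSt2 '|' '|' r from by
                          unfold pvSt2; rw [hB, cB]; rfl]
                    | none =>
                        rw [show pvSt2 '|' '|' ('|' :: r) = '|' :: r from by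
                            unfold pvSt2; rw [hB, cB]; rfl,
                          show pvSt2 '|' '|' r = r from by unfold pvSt2; rw [cB]; rfl]
                        rw [show pvSt1 '|' ('|' :: r) = pvSt1 '|' r from by
                          unfold pvSt1; simp [pvOne?]]
              · subst hc
                cases cA : pvTwo? '&' '&' r with
                | some u =>
                    unfold pvComp
                    rw [show pvSt2 '&' '&' (';' :: r) = pvSt2 '&' '&' r from by
                      unfold pvSt2; rw [hA, cA]; rfl]
                | none =>
                    unfold pvComp
                    rw [show pvSt2 '&' '&' (';' :: r) = ';' :: r from by unfold pvSt2; rw [hA, cA]; rfl,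
                      show pvSt2 '&' '&' r = r from by unfold pvSt2; rw [cA]; rfl]
                    cases cB : pvTwo? '|' '|' r with
                    | some u =>
                        rw [show pvSt2 '|' '|' (';' :: r) = pvSt2 '|' '|' r from by
                          unfold pvSt2; rw [hB, cB]; rfl]
                    | none =>
                        rw [show pvSt2 '|' '|' (';' :: r) = ';' :: r from by
                            unfold pvSt2; rw [hB, cB]; rfl,
                          show pvSt2 '|' '|' r = r from by unfold pvSt2; rw [cB]; rfl]
                        cases cC : pvOne? '|' r with
                        | some u =>
                            rw [show pvSt1 '|' (';' :: r) = pvSt1 '|' r from by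
                              unfold pvSt1; rw [pvOne?_pass _ _ _ (by decide), cC]; rfl]
                        | none =>
                            rw [show pvSt1 '|' (';' :: r) = ';' :: r from by
                                unfold pvSt1; rw [pvOne?_pass _ _ _ (by decide), cC]; rfl,
                              show pvSt1 '|' r = r from by unfold pvSt1; rw [cC]; rfl]
                            rw [show pvSt1 ';' (';' :: r) = pvSt1 ';' r from by
                              unfold pvSt1; simp [pvOne?]]
            · have hA : pvTwo? '&' '&' (c :: r) = pvTwo? '&' '&' r := pvTwo?_pass _ _ _ _ h1'.1
              have hB : pvTwo? '|' '|' (c :: r) = pvTwo? '|' '|' r := pvTwo?_pass _ _ _ _ h1'.2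
              have hC : pvOne? '|' (c :: r) = pvOne? '|' r := pvOne?_pass _ _ _ (fun hc => h2 (Or.inl hc))
              have hD : pvOne? ';' (c :: r) = pvOne? ';' r := pvOne?_pass _ _ _ (fun hc => h2 (Or.inr hc))
              rw [pvLt_cons, if_neg h1, if_neg h2]
              cases hlt : pvLt r with
              | some t =>
                  simp only [Option.getD_some]
                  have hihr := ih r (by omega)
                  rw [hlt] at hihr
                  simp only [Option.getD_some] at hihr
                  rw [hihr]
                  refine (pvComp_congr (c :: r) r hA hB hC hD ?_).symm
                  intro ⟨n1, n2, n3, n4⟩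
                  have : pvLt r = none := (pvLt_none_iff r).mpr ⟨n1, n2, n3, n4⟩
                  rw [hlt] at this
                  simp at this
              | none =>
                  simp only [Option.getD_none]
                  obtain ⟨n1, n2, n3, n4⟩ := (pvLt_none_iff r).mp hlt
                  unfold pvComp
                  rw [show pvSt2 '&' '&' (c :: r) = c :: r from by unfold pvSt2; rw [hA, n1]; rfl,
                    show pvSt2 '|' '|' (c :: r) = c :: r from by unfold pvSt2; rw [hB, n2]; rfl,
                    show pvSt1 '|' (c :: r) = c :: r from by unfold pvSt1; rw [hC, n3]; rfl,
                    show pvSt1 ';' (c :: r) = c :: r from by unfold pvSt1; rw [hD, n4]; rfl]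
  exact H c.length c le_rfl

-- ---------- bridge: splitOn / pyGet? ----------

theorem pyGet?_neg_one {α : Type} (xs : List α) : PySem.List.pyGet? xs (-1) = xs.getLast? := by
  cases xs with
  | nil => rfl
  | cons x l =>
      show (PySem.List.pyIdx? (x :: l).length (-1)).bind _ = _
      unfold PySem.List.pyIdx?
      rw [if_neg (by norm_num), if_pos (by simp)]
      simp only [Option.bind_some, List.length_cons]
      rw [List.getLast?_eq_getElem?]
      norm_num

theorem pyGet?_zero {α : Type} (xs : List α) : PySem.List.pyGet? xs 0 = xs.head? := by
  cases xs with
  | nil => rfl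
  | cons x l =>
      show (PySem.List.pyIdx? (x :: l).length 0).bind _ = _
      unfold PySem.List.pyIdx?
      rw [if_pos le_rfl, if_pos (by simp)]
      simp

theorem two_isPrefixOf_iff (a b : Char) (l : List Char) :
    [a, b].isPrefixOf l = true ↔ l.head? = some a ∧ l.tail.head? = some b := by
  rw [List.isPrefixOf_iff_prefix]
  cases l with
  | nil => simp
  | cons c r =>
      rw [List.cons_prefix_cons]
      cases r with
      | nil => simp
      | cons y t =>
          rw [List.cons_prefix_cons]
          simp only [List.head?_cons, List.tail_cons, Option.some.injEq]
          constructor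
          · rintro ⟨h1, h2, -⟩
            exact ⟨h1.symm, h2.symm⟩
          · rintro ⟨h1, h2⟩
            exact ⟨h1.symm, h2.symm, List.nil_prefix⟩

theorem one_isPrefixOf_iff (x : Char) (l : List Char) :
    [x].isPrefixOf l = true ↔ l.head? = some x := by
  rw [List.isPrefixOf_iff_prefix]
  cases l with
  | nil => simp
  | cons c r =>
      rw [List.cons_prefix_cons]
      simp only [List.head?_cons, Option.some.injEq]
      constructor
      · rintro ⟨h1, -⟩
        exact h1.symm
      · rintro h1
        exact ⟨h1.symm, List.nil_prefix⟩

theorem go_last_two (a b : Char) (fuel : Nat) :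
    ∀ (l cur : List Char) (acc : List (List Char)), l.length < fuel →
      (PySem.Chars.splitOn.go [a, b] fuel l cur acc).getLast? =
        some ((pvTwo? a b l).getD (cur.reverse ++ l)) := by
  induction fuel with
  | zero => intro l cur acc h; exact absurd h (Nat.not_lt_zero _)
  | succ f ih =>
      intro l cur acc h
      cases l with
      | nil =>
          show ((cur.reverse :: acc).reverse).getLast? = _
          rw [List.getLast?_reverse]
          simp [pvTwo?_nil]
      | cons c rest =>
          show (if [a, b].isPrefixOf (c :: rest) = true then
              PySem.Chars.splitOn.go [a, b] f ((c :: rest).drop 2) [] (cur.reverse :: acc)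
            else PySem.Chars.splitOn.go [a, b] f rest (c :: cur) acc).getLast? = _
          by_cases hp : [a, b].isPrefixOf (c :: rest) = true
          · obtain ⟨hh1, hh2⟩ := (two_isPrefixOf_iff a b _).mp hp
            simp only [List.head?_cons, Option.some.injEq] at hh1
            cases rest with
            | nil => simp at hh2
            | cons y t =>
                simp only [List.tail_cons, List.head?_cons, Option.some.injEq] at hh2
                subst hh1; subst hh2
                rw [if_pos hp]
                simp only [List.drop_succ_cons, List.drop_zero]
                rw [ih t [] (cur.reverse :: acc) (by simp only [List.length_cons] at h ⊢; omega)]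
                rw [pvTwo?_cons, if_pos ⟨rfl, rfl⟩]
                simp
          · rw [if_neg hp]
            rw [ih rest (c :: cur) acc (by simp only [List.length_cons] at h; omega)]
            have hpass : ¬ (c = a ∧ rest.head? = some b) := by
              intro ⟨hc, hh⟩
              exact hp ((two_isPrefixOf_iff a b _).mpr ⟨by simp [hc], by simpa using hh⟩)
            rw [pvTwo?_pass _ _ _ _ hpass]
            simp [List.reverse_cons]

theorem go_last_one (ch : Char) (fuel : Nat) :
    ∀ (l cur : List Char) (acc : List (List Char)), l.length < fuel →
      (PySem.Chars.splitOn.go [ch] fuel l cur acc).getLast? =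
        some ((pvOne? ch l).getD (cur.reverse ++ l)) := by
  induction fuel with
  | zero => intro l cur acc h; exact absurd h (Nat.not_lt_zero _)
  | succ f ih =>
      intro l cur acc h
      cases l with
      | nil =>
          show ((cur.reverse :: acc).reverse).getLast? = _
          rw [List.getLast?_reverse]
          simp [pvOne?]
      | cons c rest =>
          show (if [ch].isPrefixOf (c :: rest) = true then
              PySem.Chars.splitOn.go [ch] f ((c :: rest).drop 1) [] (cur.reverse :: acc)
            else PySem.Chars.splitOn.go [ch] f rest (c :: cur) acc).getLast? = _
          by_cases hp : [ch].isPrefixOf (c :: rest) = true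
          · have hc : c = ch := by
              have := (one_isPrefixOf_iff ch _).mp hp
              simpa using this
            subst hc
            rw [if_pos hp]
            simp only [List.drop_succ_cons, List.drop_zero]
            rw [ih rest [] (cur.reverse :: acc) (by simp only [List.length_cons] at h ⊢; omega)]
            rw [show pvOne? c (c :: rest) = some ((pvOne? c rest).getD rest) from by simp [pvOne?]]
            simp
          · have hc : c ≠ ch := by
              intro hh
              exact hp ((one_isPrefixOf_iff ch _).mpr (by simp [hh]))
            rw [if_neg hp]
            rw [ih rest (c :: cur) acc (by simp only [List.length_cons] at h; omega)]
            rw [pvOne?_pass _ _ _ hc]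
            simp [List.reverse_cons]

theorem splitOn_last_two (a b : Char) (c : List Char) :
    (PySem.Chars.splitOn c [a, b]).getLast? = some ((pvTwo? a b c).getD c) := by
  show (PySem.Chars.splitOn.go [a, b] (c.length + 1) c [] []).getLast? = _
  rw [go_last_two a b (c.length + 1) c [] [] (by omega)]
  simp

theorem splitOn_last_one (ch : Char) (c : List Char) :
    (PySem.Chars.splitOn c [ch]).getLast? = some ((pvOne? ch c).getD c) := by
  show (PySem.Chars.splitOn.go [ch] (c.length + 1) c [] []).getLast? = _
  rw [go_last_one ch (c.length + 1) c [] [] (by omega)]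
  simp

-- ---------- occurrence facts ----------

theorem pvTwo?_some_infix (a b : Char) (l t : List Char) (h : pvTwo? a b l = some t) :
    [a, b] <:+: l := by
  have H : ∀ n l t, l.length ≤ n → pvTwo? a b l = some t → [a, b] <:+: l := by
    intro n
    induction n with
    | zero =>
        intro l t hl h
        have : l = [] := by cases l <;> simp_all
        subst this; rw [pvTwo?_nil] at h; simp at h
    | succ n ih =>
        intro l t hl h
        cases l with
        | nil => rw [pvTwo?_nil] at h; simp at h
        | cons c r =>
            simp only [List.length_cons] at hl
            by_cases hcond : c = a ∧ r.head? = some b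
            · obtain ⟨hc, hh⟩ := hcond
              cases r with
              | nil => simp at hh
              | cons y rr =>
                  simp only [List.head?_cons, Option.some.injEq] at hh
                  exact ⟨[], rr, by simp [hc, hh]⟩
            · rw [pvTwo?_pass _ _ _ _ hcond] at h
              exact List.infix_cons (ih r t (by omega) h)
  exact H l.length l t le_rfl h

theorem pvOne?_eq_none_iff (ch : Char) (l : List Char) : pvOne? ch l = none ↔ ch ∉ l := by
  induction l with
  | nil => simp [pvOne?]
  | cons c r ih =>
      by_cases hc : c = ch
      · subst hc; simp [pvOne?]
      · simp [pvOne?, hc, ih, Ne.symm hc]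

theorem pvOne?_some (ch : Char) (l t : List Char) (h : pvOne? ch l = some t) :
    ∃ p, l = p ++ ch :: t ∧ ch ∉ t := by
  induction l generalizing t with
  | nil => simp [pvOne?] at h
  | cons c r ih =>
      by_cases hc : c = ch
      · subst hc
        rw [show pvOne? c (c :: r) = some ((pvOne? c r).getD r) from by simp [pvOne?]] at h
        injection h with h
        cases hr : pvOne? c r with
        | some u =>
            rw [hr] at h
            simp only [Option.getD_some] at h
            subst h
            obtain ⟨p, hp, hn⟩ := ih _ hr
            exact ⟨c :: p, by simp [hp], hn⟩
        | none =>
            rw [hr] at h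
            simp only [Option.getD_none] at h
            subst h
            exact ⟨[], by simp, (pvOne?_eq_none_iff c r).mp hr⟩
      · rw [pvOne?_pass _ _ _ hc] at h
        obtain ⟨p, hp, hn⟩ := ih _ h
        exact ⟨c :: p, by simp [hp], hn⟩

-- ---------- rfind ----------

theorem rfind_go_none (s : List Char) (ch : Char) (h : ch ∉ s) :
    ∀ k, PySem.Chars.rfind.go s [ch] k = -1 := by
  intro k
  induction k with
  | zero =>
      show (if [ch].isPrefixOf s = true then (0 : Int) else -1) = -1
      rw [if_neg]
      intro hp
      have := (one_isPrefixOf_iff ch s).mp hp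
      cases s with
      | nil => simp at this
      | cons x r => simp at this; subst this; exact h (by simp)
  | succ j ih =>
      show (if [ch].isPrefixOf (s.drop (j + 1)) = true then ((j + 1 : Nat) : Int) else
        PySem.Chars.rfind.go s [ch] j) = -1
      rw [if_neg, ih]
      intro hp
      have := (one_isPrefixOf_iff ch _).mp hp
      cases hd : s.drop (j + 1) with
      | nil => rw [hd] at this; simp at this
      | cons x r =>
          rw [hd] at this
          simp at this
          subst this
          exact h (List.mem_of_mem_drop (by rw [hd]; simp))

theorem rfind_go_found (p t : List Char) (ch : Char) (hn : ch ∉ t) :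
    ∀ k, p.length ≤ k → PySem.Chars.rfind.go (p ++ ch :: t) [ch] k = p.length := by
  intro k
  induction k with
  | zero =>
      intro hk
      have hp0 : p = [] := by cases p <;> simp_all
      subst hp0
      show (if [ch].isPrefixOf (([] : List Char) ++ ch :: t) = true then (0 : Int) else -1) = _
      rw [if_pos ((one_isPrefixOf_iff ch _).mpr (by simp))]
      simp
  | succ j ih =>
      intro hk
      show (if [ch].isPrefixOf ((p ++ ch :: t).drop (j + 1)) = true then ((j + 1 : Nat) : Int) else
        PySem.Chars.rfind.go (p ++ ch :: t) [ch] j) = p.length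
      by_cases he : p.length = j + 1
      · have hpre : [ch].isPrefixOf ((p ++ ch :: t).drop (j + 1)) = true := by
          apply (one_isPrefixOf_iff ch _).mpr
          rw [← he, List.drop_left]
          simp
        rw [if_pos hpre, he]
      · have hlt : p.length ≤ j := by omega
        rw [if_neg, ih hlt]
        intro hp
        have hhd := (one_isPrefixOf_iff ch _).mp hp
        rw [show j + 1 = p.length + (j - p.length + 1) from by omega, List.drop_append] at hhd
        rw [List.drop_eq_nil_of_le (by omega : p.length ≤ p.length + (j - p.length + 1)),
          show p.length + (j - p.length + 1) - p.length = (j - p.length) + 1 from by omega,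
          List.drop_succ_cons, List.nil_append] at hhd
        cases hd : t.drop (j - p.length) with
        | nil => rw [hd] at hhd; simp at hhd
        | cons x r =>
            rw [hd] at hhd
            simp only [List.head?_cons, Option.some.injEq] at hhd
            have hmem : x ∈ t := List.mem_of_mem_drop (by rw [hd]; exact List.mem_cons_self ..)
            rw [hhd] at hmem
            exact hn hmem

theorem basename_eq (cmd : List Char) :
    (if PySem.Chars.isIn ['/'] cmd then
        (PySem.List.pyGet? (PySem.Chars.splitOn cmd ['/']) (-1)).getD []
      else cmd) =
      PySem.List.slice cmd (some (PySem.Chars.rfind cmd ['/'] + 1)) none := by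
  cases hc : pvOne? '/' cmd with
  | none =>
      have hnm : '/' ∉ cmd := (pvOne?_eq_none_iff _ _).mp hc
      have hin : PySem.Chars.isIn ['/'] cmd = false := by
        rw [PySem.Chars.isIn_eq_false_iff]
        intro hinf
        exact hnm (hinf.subset (by simp))
      rw [if_neg (by simp [hin])]
      have hrf : PySem.Chars.rfind cmd ['/'] = -1 := by
        show PySem.Chars.rfind.go cmd ['/'] cmd.length = -1
        exact rfind_go_none cmd '/' hnm _
      rw [hrf]
      norm_num
  | some t =>
      obtain ⟨p, hp, hn⟩ := pvOne?_some _ _ _ hc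
      subst hp
      have hin : PySem.Chars.isIn ['/'] (p ++ '/' :: t) = true := by
        rw [PySem.Chars.isIn_iff_infix]
        exact ⟨p, t, by simp⟩
      rw [if_pos (by simp [hin])]
      rw [pyGet?_neg_one, splitOn_last_one '/' (p ++ '/' :: t), hc]
      simp only [Option.getD_some]
      have hrf : PySem.Chars.rfind (p ++ '/' :: t) ['/'] = p.length := by
        show PySem.Chars.rfind.go (p ++ '/' :: t) ['/'] (p ++ '/' :: t).length = p.length
        exact rfind_go_found p t '/' hn _ (by simp)
      rw [hrf]
      rw [PySem.List.slice_from _ (by omega : (0:Int) ≤ (p.length : Int) + 1)]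
      rw [show ((p.length : Int) + 1).toNat = p.length + 1 from by omega]
      rw [show p ++ '/' :: t = (p ++ ['/']) ++ t from by simp]
      rw [show p.length + 1 = (p ++ ['/']).length from by simp]
      exact List.drop_left.symm

-- ---------- whitespace / strip facts ----------

theorem ws_ne (c a : Char) (hc : PySem.Chars.isspace c = true)
    (ha : PySem.Chars.isspace a = false) : c ≠ a := by
  intro h; rw [h, ha] at hc; exact Bool.noConfusion hc

theorem pvTwo?_lstrip (a b : Char) (ha : PySem.Chars.isspace a = false) (y : List Char) :
    pvTwo? a b (y.dropWhile PySem.Chars.isspace) = pvTwo? a b y := by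
  induction y with
  | nil => rfl
  | cons c r ih =>
      by_cases hc : PySem.Chars.isspace c = true
      · rw [List.dropWhile_cons_of_pos hc, ih,
          pvTwo?_pass _ _ _ _ (fun hh => ws_ne c a hc ha hh.1)]
      · rw [List.dropWhile_cons_of_neg (by simp [hc])]

theorem pvOne?_lstrip (ch : Char) (hch : PySem.Chars.isspace ch = false) (y : List Char) :
    pvOne? ch (y.dropWhile PySem.Chars.isspace) = pvOne? ch y := by
  induction y with
  | nil => rfl
  | cons c r ih =>
      by_cases hc : PySem.Chars.isspace c = true
      · rw [List.dropWhile_cons_of_pos hc, ih, pvOne?_pass _ _ _ (ws_ne c ch hc hch)]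
      · rw [List.dropWhile_cons_of_neg (by simp [hc])]

theorem pvOne?_ws_none (ch : Char) (hch : PySem.Chars.isspace ch = false) (t : List Char)
    (ht : ∀ w ∈ t, PySem.Chars.isspace w = true) : pvOne? ch t = none := by
  induction t with
  | nil => rfl
  | cons w t' ih =>
      rw [pvOne?_pass _ _ _ (ws_ne w ch (ht w (by simp)) hch)]
      exact ih (fun w hw => ht w (by simp [hw]))

theorem pvTwo?_ws_none (a b : Char) (ha : PySem.Chars.isspace a = false) (t : List Char)
    (ht : ∀ w ∈ t, PySem.Chars.isspace w = true) : pvTwo? a b t = none := by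
  induction t with
  | nil => exact pvTwo?_nil a b
  | cons w t' ih =>
      rw [pvTwo?_pass _ _ _ _ (fun hh => ws_ne w a (ht w (by simp)) ha hh.1)]
      exact ih (fun w hw => ht w (by simp [hw]))

theorem pvOne?_append_ws (ch : Char) (hch : PySem.Chars.isspace ch = false)
    (m t : List Char) (ht : ∀ w ∈ t, PySem.Chars.isspace w = true) :
    pvOne? ch (m ++ t) = (pvOne? ch m).map (· ++ t) := by
  induction m with
  | nil => simp [pvOne?, pvOne?_ws_none ch hch t ht]
  | cons c m' ih =>
      by_cases hc : c = ch
      · subst hc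
        rw [List.cons_append,
          show pvOne? c (c :: (m' ++ t)) = some ((pvOne? c (m' ++ t)).getD (m' ++ t)) from by
            simp [pvOne?],
          show pvOne? c (c :: m') = some ((pvOne? c m').getD m') from by simp [pvOne?]]
        rw [ih]
        cases h' : pvOne? c m' <;> simp
      · rw [List.cons_append, pvOne?_pass _ _ _ hc, pvOne?_pass _ _ _ hc, ih]

theorem pvTwo?_append_ws (a b : Char) (ha : PySem.Chars.isspace a = false)
    (hb : PySem.Chars.isspace b = false) (m t : List Char)
    (ht : ∀ w ∈ t, PySem.Chars.isspace w = true) :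
    pvTwo? a b (m ++ t) = (pvTwo? a b m).map (· ++ t) := by
  have H : ∀ n m, m.length ≤ n → pvTwo? a b (m ++ t) = (pvTwo? a b m).map (· ++ t) := by
    intro n
    induction n with
    | zero =>
        intro m hm
        have : m = [] := by cases m <;> simp_all
        subst this
        simp [pvTwo?_nil, pvTwo?_ws_none a b ha t ht]
    | succ n ih =>
        intro m hm
        cases m with
        | nil => simp [pvTwo?_nil, pvTwo?_ws_none a b ha t ht]
        | cons c m' =>
            simp only [List.length_cons] at hm
            cases m' with
            | nil =>
                have hcond : ¬ (c = a ∧ (([] : List Char) ++ t).head? = some b) := by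
                  rintro ⟨-, hh⟩
                  cases t with
                  | nil => simp at hh
                  | cons w t' =>
                      simp only [List.nil_append, List.head?_cons, Option.some.injEq] at hh
                      exact ws_ne w b (ht w (by simp)) hb hh
                rw [List.cons_append, pvTwo?_pass _ _ _ _ hcond]
                simp only [List.nil_append]
                rw [pvTwo?_ws_none a b ha t ht,
                  show pvTwo? a b [c] = none from by
                    rw [pvTwo?_pass _ _ _ _ (by simp), pvTwo?_nil]]
                rfl
            | cons y m'' =>
                by_cases hcond : c = a ∧ y = b
                · obtain ⟨hc, hy⟩ := hcond
                  simp only [List.cons_append]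
                  rw [pvTwo?_cons a b c (y :: (m'' ++ t)), if_pos ⟨hc, by simp [hy]⟩]
                  simp only [List.tail_cons]
                  rw [ih m'' (by simp only [List.length_cons] at hm; omega)]
                  rw [pvTwo?_cons a b c (y :: m''), if_pos ⟨hc, by simp [hy]⟩]
                  simp only [List.tail_cons, Option.map_some]
                  cases h'' : pvTwo? a b m'' <;> simp
                · have hc1 : ¬ (c = a ∧ ((y :: m'') ++ t).head? = some b) := by
                    rintro ⟨hc, hh⟩
                    simp only [List.cons_append, List.head?_cons, Option.some.injEq] at hh
                    exact hcond ⟨hc, hh⟩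
                  have hc2 : ¬ (c = a ∧ (y :: m'').head? = some b) := by
                    rintro ⟨hc, hh⟩
                    simp only [List.head?_cons, Option.some.injEq] at hh
                    exact hcond ⟨hc, hh⟩
                  rw [List.cons_append, pvTwo?_pass _ _ _ _ (by simpa using hc1),
                    pvTwo?_pass _ _ _ _ hc2]
                  exact ih (y :: m'') (by simp only [List.length_cons] at hm ⊢; omega)
  exact H m.length m le_rfl

theorem dropWhile_head_false {α : Type} (p : α → Bool) (l : List α) (c : α) (r : List α)
    (h : l.dropWhile p = c :: r) : p c = false := by
  induction l with
  | nil => simp at h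
  | cons x xs ih =>
      by_cases hx : p x = true
      · rw [List.dropWhile_cons_of_pos hx] at h
        exact ih h
      · rw [List.dropWhile_cons_of_neg (by simp [hx])] at h
        injection h with h1 _
        subst h1
        simp [hx]

theorem dropWhile_idem {α : Type} (p : α → Bool) (l : List α) :
    (l.dropWhile p).dropWhile p = l.dropWhile p := by
  cases h : l.dropWhile p with
  | nil => rfl
  | cons c r =>
      rw [List.dropWhile_cons_of_neg (by simp [dropWhile_head_false p l c r h])]

theorem rstrip_decomp (l : List Char) :
    ∃ t, l = PySem.Chars.rstrip l ++ t ∧ ∀ w ∈ t, PySem.Chars.isspace w = true := by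
  refine ⟨(l.reverse.takeWhile PySem.Chars.isspace).reverse, ?_, ?_⟩
  · show l = (l.reverse.dropWhile PySem.Chars.isspace).reverse ++ _
    rw [← List.reverse_append, List.takeWhile_append_dropWhile, List.reverse_reverse]
  · intro w hw
    rw [List.mem_reverse] at hw
    exact List.mem_takeWhile_imp hw

theorem rstrip_append_ws (x t : List Char) (ht : ∀ w ∈ t, PySem.Chars.isspace w = true) :
    PySem.Chars.rstrip (x ++ t) = PySem.Chars.rstrip x := by
  show (List.dropWhile _ (x ++ t).reverse).reverse = (List.dropWhile _ x.reverse).reverse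
  rw [List.reverse_append, List.dropWhile_append,
    if_pos (by
      simp only [List.isEmpty_iff]
      rw [List.dropWhile_eq_nil_iff]
      intro w hw
      exact ht w (by simpa using hw))]

theorem strip_append_ws (u t : List Char) (ht : ∀ w ∈ t, PySem.Chars.isspace w = true) :
    PySem.Chars.strip (u ++ t) = PySem.Chars.strip u := by
  show PySem.Chars.rstrip (List.dropWhile _ (u ++ t)) = PySem.Chars.rstrip (List.dropWhile _ u)
  rw [List.dropWhile_append]
  by_cases hu : (u.dropWhile PySem.Chars.isspace).isEmpty
  · rw [if_pos hu, List.isEmpty_iff.mp hu]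
    rw [show List.dropWhile PySem.Chars.isspace t = [] from
      List.dropWhile_eq_nil_iff.mpr (fun w hw => ht w hw)]
  · rw [if_neg hu]
    exact rstrip_append_ws _ t ht

theorem strip_idem (y : List Char) :
    PySem.Chars.strip (PySem.Chars.strip y) = PySem.Chars.strip y := by
  show PySem.Chars.rstrip (List.dropWhile _ (PySem.Chars.rstrip (List.dropWhile _ y))) =
    PySem.Chars.rstrip (List.dropWhile _ y)
  set z := List.dropWhile PySem.Chars.isspace y with hzdef
  have hz : List.dropWhile PySem.Chars.isspace z = z := by rw [hzdef]; exact dropWhile_idem _ y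
  obtain ⟨t, hdec, ht⟩ := rstrip_decomp z
  have hA : List.dropWhile PySem.Chars.isspace (PySem.Chars.rstrip z) = PySem.Chars.rstrip z := by
    cases hrz : PySem.Chars.rstrip z with
    | nil => rfl
    | cons c w =>
        have hzz : z = c :: (w ++ t) := by rw [hdec, hrz]; simp
        have hc : PySem.Chars.isspace c = false :=
          dropWhile_head_false PySem.Chars.isspace z c (w ++ t) (hz.trans hzz)
        rw [List.dropWhile_cons_of_neg (by simp [hc])]
  rw [hA]
  conv_rhs => rw [hdec]
  exact (rstrip_append_ws _ t ht).symm

-- ---------- stage-by-stage strip absorption ----------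

theorem st2_strip (a b : Char) (ha : PySem.Chars.isspace a = false)
    (hb : PySem.Chars.isspace b = false) (y : List Char) :
    PySem.Chars.strip (pvSt2 a b (PySem.Chars.strip y)) =
      PySem.Chars.strip (pvSt2 a b y) := by
  obtain ⟨t, hdec, ht⟩ := rstrip_decomp (List.dropWhile PySem.Chars.isspace y)
  have hdec' : List.dropWhile PySem.Chars.isspace y = PySem.Chars.strip y ++ t := hdec
  have hy : pvTwo? a b y = (pvTwo? a b (PySem.Chars.strip y)).map (· ++ t) := by
    rw [← pvTwo?_lstrip a b ha y, hdec']
    exact pvTwo?_append_ws a b ha hb _ t ht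
  unfold pvSt2
  cases hs : pvTwo? a b (PySem.Chars.strip y) with
  | some u =>
      rw [hy, hs]
      simp only [Option.map_some, Option.getD_some]
      exact (strip_append_ws u t ht).symm
  | none =>
      rw [hy, hs]
      simp only [Option.map_none, Option.getD_none]
      exact strip_idem y

theorem st1_strip (ch : Char) (hch : PySem.Chars.isspace ch = false) (y : List Char) :
    PySem.Chars.strip (pvSt1 ch (PySem.Chars.strip y)) =
      PySem.Chars.strip (pvSt1 ch y) := by
  obtain ⟨t, hdec, ht⟩ := rstrip_decomp (List.dropWhile PySem.Chars.isspace y)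
  have hdec' : List.dropWhile PySem.Chars.isspace y = PySem.Chars.strip y ++ t := hdec
  have hy : pvOne? ch y = (pvOne? ch (PySem.Chars.strip y)).map (· ++ t) := by
    rw [← pvOne?_lstrip ch hch y, hdec']
    exact pvOne?_append_ws ch hch _ t ht
  unfold pvSt1
  cases hs : pvOne? ch (PySem.Chars.strip y) with
  | some u =>
      rw [hy, hs]
      simp only [Option.map_some, Option.getD_some]
      exact (strip_append_ws u t ht).symm
  | none =>
      rw [hy, hs]
      simp only [Option.map_none, Option.getD_none]
      exact strip_idem y

-- ---------- A's per-operator step in terms of the stage functions ----------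

theorem stepA_two (a b : Char) (c : List Char) (hstr : PySem.Chars.strip c = c) :
    pvStepA c [a, b] = PySem.Chars.strip (pvSt2 a b c) := by
  unfold pvStepA
  by_cases hin : PySem.Chars.isIn [a, b] c = true
  · rw [if_pos hin, pyGet?_neg_one, splitOn_last_two]
    simp [pvSt2]
  · rw [if_neg hin]
    have hn : pvTwo? a b c = none := by
      cases hx : pvTwo? a b c with
      | none => rfl
      | some t =>
          exact absurd ((PySem.Chars.isIn_iff_infix _ _).mpr (pvTwo?_some_infix _ _ _ _ hx)) hin
    unfold pvSt2
    rw [hn]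
    exact hstr.symm

theorem pvOne?_some_infix (ch : Char) (l t : List Char) (h : pvOne? ch l = some t) :
    [ch] <:+: l := by
  obtain ⟨p, hp, -⟩ := pvOne?_some ch l t h
  exact ⟨p, t, by simp [hp]⟩

theorem stepA_one (ch : Char) (c : List Char) (hstr : PySem.Chars.strip c = c) :
    pvStepA c [ch] = PySem.Chars.strip (pvSt1 ch c) := by
  unfold pvStepA
  by_cases hin : PySem.Chars.isIn [ch] c = true
  · rw [if_pos hin, pyGet?_neg_one, splitOn_last_one]
    simp [pvSt1]
  · rw [if_neg hin]
    have hn : pvOne? ch c = none := by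
      cases hx : pvOne? ch c with
      | none => rfl
      | some t =>
          exact absurd ((PySem.Chars.isIn_iff_infix _ _).mpr (pvOne?_some_infix _ _ _ hx)) hin
    unfold pvSt1
    rw [hn]
    exact hstr.symm

-- ---------- split₀ ignores outer whitespace ----------

theorem go0_ws (t : List Char) (ht : ∀ w ∈ t, PySem.Chars.isspace w = true)
    (cur : List Char) (acc : List (List Char)) :
    PySem.Chars.split₀.go t cur acc =
      if cur.isEmpty then acc.reverse else (cur.reverse :: acc).reverse := by
  induction t generalizing cur acc with
  | nil => rfl
  | cons w t' ih =>
      have hw : PySem.Chars.isspace w = true := ht w (by simp)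
      show (if PySem.Chars.isspace w = true then
          (if cur.isEmpty then PySem.Chars.split₀.go t' [] acc
            else PySem.Chars.split₀.go t' [] (cur.reverse :: acc))
        else PySem.Chars.split₀.go t' (w :: cur) acc) = _
      rw [if_pos hw]
      by_cases hc : cur.isEmpty
      · rw [if_pos hc, if_pos hc, ih (fun w hw => ht w (by simp [hw]))]
        rfl
      · rw [if_neg hc, if_neg hc, ih (fun w hw => ht w (by simp [hw]))]
        rfl

theorem go0_append_ws (t : List Char) (ht : ∀ w ∈ t, PySem.Chars.isspace w = true) :
    ∀ (l cur : List Char) (acc : List (List Char)),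
      PySem.Chars.split₀.go (l ++ t) cur acc = PySem.Chars.split₀.go l cur acc := by
  intro l
  induction l with
  | nil =>
      intro cur acc
      simp only [List.nil_append]
      rw [go0_ws t ht cur acc]
      rfl
  | cons c l' ih =>
      intro cur acc
      show (if PySem.Chars.isspace c = true then
          (if cur.isEmpty then PySem.Chars.split₀.go (l' ++ t) [] acc
            else PySem.Chars.split₀.go (l' ++ t) [] (cur.reverse :: acc))
        else PySem.Chars.split₀.go (l' ++ t) (c :: cur) acc) =
        (if PySem.Chars.isspace c = true then
          (if cur.isEmpty then PySem.Chars.split₀.go l' [] acc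
            else PySem.Chars.split₀.go l' [] (cur.reverse :: acc))
        else PySem.Chars.split₀.go l' (c :: cur) acc)
      rw [ih, ih, ih]

theorem go0_lstrip (y : List Char) (acc : List (List Char)) :
    PySem.Chars.split₀.go (y.dropWhile PySem.Chars.isspace) [] acc =
      PySem.Chars.split₀.go y [] acc := by
  induction y generalizing acc with
  | nil => rfl
  | cons c r ih =>
      by_cases hc : PySem.Chars.isspace c = true
      · rw [List.dropWhile_cons_of_pos hc]
        show PySem.Chars.split₀.go (r.dropWhile PySem.Chars.isspace) [] acc =
          (if PySem.Chars.isspace c = true then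
            (if (([] : List Char).isEmpty) = true then PySem.Chars.split₀.go r [] acc
              else PySem.Chars.split₀.go r [] (([] : List Char).reverse :: acc))
          else PySem.Chars.split₀.go r (c :: []) acc)
        rw [if_pos hc, if_pos (by rfl)]
        exact ih acc
      · rw [List.dropWhile_cons_of_neg (by simp [hc])]

theorem split₀_strip (y : List Char) :
    PySem.Chars.split₀ (PySem.Chars.strip y) = PySem.Chars.split₀ y := by
  obtain ⟨t, hdec, ht⟩ := rstrip_decomp (List.dropWhile PySem.Chars.isspace y)
  have hdec' : List.dropWhile PySem.Chars.isspace y = PySem.Chars.strip y ++ t := hdec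
  show PySem.Chars.split₀.go (PySem.Chars.strip y) [] [] = PySem.Chars.split₀.go y [] []
  rw [← go0_lstrip y [], hdec', go0_append_ws t ht]

-- ---------- sudo/su skipping: index pointer vs list slicing ----------

theorem flags_corr (P : List (List Char)) : ∀ i, P.drop (pvFlagsB P i) = pvFlagsA (P.drop i) := by
  have H : ∀ n i, P.length - i ≤ n → P.drop (pvFlagsB P i) = pvFlagsA (P.drop i) := by
    intro n
    induction n with
    | zero =>
        intro i h
        rw [pvFlagsB, dif_neg (by omega)]
        rw [List.drop_eq_nil_of_le (by omega), pvFlagsA]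
    | succ n ih =>
        intro i h
        by_cases hi : i < P.length
        · rw [pvFlagsB, dif_pos hi]
          have hdrop : P.drop i = P[i] :: P.drop (i + 1) := List.drop_eq_getElem_cons hi
          rw [hdrop, pvFlagsA]
          by_cases h1 : PySem.Chars.startswith P[i] ['-'] = true
          · rw [if_pos h1, if_pos h1]
            by_cases h2 : P[i] = ['-', 'c'] ∨ P[i] = ['-', 'u']
            · rw [if_pos h2, if_pos h2]
              rw [List.drop_drop]
              rw [show i + 1 + 1 = i + 2 from by omega]
              exact ih (i + 2) (by omega)
            · rw [if_neg h2, if_neg h2]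
              exact ih (i + 1) (by omega)
          · rw [if_neg h1, if_neg h1]
            exact hdrop
        · rw [pvFlagsB, dif_neg hi]
          rw [List.drop_eq_nil_of_le (by omega), pvFlagsA]
  intro i
  exact H (P.length - i) i le_rfl

theorem sudo_corr (P : List (List Char)) : ∀ i, P.drop (pvSudoB P i) = pvSudoA (P.drop i) := by
  have H : ∀ n i, P.length - i ≤ n → P.drop (pvSudoB P i) = pvSudoA (P.drop i) := by
    intro n
    induction n with
    | zero =>
        intro i h
        rw [pvSudoB, dif_neg (by omega)]
        rw [List.drop_eq_nil_of_le (by omega), pvSudoA]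
    | succ n ih =>
        intro i h
        by_cases hi : i < P.length
        · rw [pvSudoB, dif_pos hi]
          have hdrop : P.drop i = P[i] :: P.drop (i + 1) := List.drop_eq_getElem_cons hi
          rw [hdrop, pvSudoA]
          by_cases h1 : P[i] = ['s', 'u', 'd', 'o'] ∨ P[i] = ['s', 'u']
          · rw [if_pos h1, if_pos h1]
            rw [← flags_corr P (i + 1)]
            have hle := le_pvFlagsB P (i + 1)
            exact ih (pvFlagsB P (i + 1)) (by omega)
          · rw [if_neg h1, if_neg h1]
            exact hdrop
        · rw [pvSudoB, dif_neg hi]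
          rw [List.drop_eq_nil_of_le (by omega), pvSudoA]
  intro i
  exact H (P.length - i) i le_rfl

-- ===== VERDICT (by name: the statement is the Claim_ definition above) =====
theorem extract_last_executable_command_spec : Claim_equal_extract_last_executable_command := by
  intro command _
  unfold Spec_extract_last_executable_command
  unfold extract_last_executable_command extract_last_executable_command_alt
  simp only []
  set s := PySem.Chars.strip command.toList with hs
  have h0 : PySem.Chars.strip s = s := by rw [hs]; exact strip_idem _
  have hfold : List.foldl pvStepA s [['&', '&'], ['|', '|'], ['|'], [';']] =
      PySem.Chars.strip (pvComp s) := by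
    simp only [List.foldl_cons, List.foldl_nil]
    rw [stepA_two '&' '&' s h0]
    rw [stepA_two '|' '|' _ (strip_idem _)]
    rw [st2_strip '|' '|' (by decide) (by decide)]
    rw [stepA_one '|' _ (strip_idem _)]
    rw [st1_strip '|' (by decide)]
    rw [stepA_one ';' _ (strip_idem _)]
    rw [st1_strip ';' (by decide)]
    rfl
  have hscan : pvScanB s s = pvComp s := by rw [pvScanB_eq_lt, pvLt_comp]
  rw [hfold, hscan]
  have htok : PySem.Chars.split₀ (PySem.Chars.strip (pvComp s)) =
      PySem.Chars.split₀ (pvComp s) := split₀_strip _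
  by_cases hc4 : PySem.Chars.strip (pvComp s) = []
  · rw [if_pos hc4]
    have hPnil : PySem.Chars.split₀ (pvComp s) = [] := by
      rw [← htok, hc4]; rfl
    rw [hPnil]
    rw [show pvSudoB [] 0 = 0 from by rw [pvSudoB]; rfl]
    rfl
  · rw [if_neg hc4]
    set P := PySem.Chars.split₀ (pvComp s) with hP
    have hsudo : P.drop (pvSudoB P 0) = pvSudoA P := by
      have := sudo_corr P 0
      simpa using this
    set j := pvSudoB P 0 with hj
    rw [htok]
    by_cases hpart : pvSudoA P = []
    · rw [if_pos hpart]
      have hlen : P.length ≤ j := by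
        by_contra hlt
        push_neg at hlt
        have : P.drop j ≠ [] := by
          rw [List.drop_eq_getElem_cons hlt]
          exact List.cons_ne_nil _ _
        rw [hsudo] at this
        exact this hpart
      rw [dif_neg (by omega)]
    · rw [if_neg hpart]
      have hjlt : j < P.length := by
        by_contra hge
        push_neg at hge
        have : P.drop j = [] := List.drop_eq_nil_of_le hge
        rw [hsudo] at this
        exact hpart this
      rw [dif_pos hjlt]
      have hhead : pvSudoA P = P[j] :: P.drop (j + 1) := by
        rw [← hsudo, List.drop_eq_getElem_cons hjlt]
      rw [hhead, pyGet?_zero]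
      simp only [List.head?_cons, Option.getD_some]
      rw [basename_eq]
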